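-- pv_equiv track=rewrite | github.com/changhun/python-PS | 2회차/기출 문제/14 외벽 점검.py | can_cover_ver3
-- ===== SOURCE A (Python) =====
-- def can_cover_ver3(n, weak_copy, dist_comb, weak_start):
--     weak_len = len(weak_copy)//2
--
--     dist_idx = 0
--     prev_cover = weak_copy[weak_start] + dist_comb[0]
--     for weak_idx in range(weak_start, weak_start + weak_len):
--         if weak_copy[weak_idx] > prev_cover:
--             if dist_idx == len(dist_comb) - 1:
--                 return False
--
--             dist_idx += 1
--             prev_cover = weak_copy[weak_idx] + dist_comb[dist_idx]
--
--     return True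
-- ===== SOURCE B (Python) =====
-- def can_cover_ver3(n, weak_copy, dist_comb, weak_start):
--     # Friend-outer greedy with a two-pointer cursor instead of A's index-outer scan.
--     end = weak_start + len(weak_copy) // 2
--     cursor = weak_start
--     cover = weak_copy[weak_start] + dist_comb[0]
--     for d in dist_comb[1:]:
--         while cursor < end and weak_copy[cursor] <= cover:
--             cursor += 1
--         if cursor >= end:
--             return True
--         cover = weak_copy[cursor] + d
--         cursor += 1
--     while cursor < end and weak_copy[cursor] <= cover:
--         cursor += 1
--     return cursor >= end
-- ===== Notes on version B (the rewrite author's own statement) =====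
-- stated objective: alternative
-- what changed: A loops over the weak-point indices keeping a dist_idx/prev_cover state; B loops over the friends (distances), each friend advancing a single two-pointer cursor through the weak points with an inner while, returning True as soon as the cursor reaches the end.
-- outside the precondition, e.g. on can_cover_ver3(0, [0, 0, 0, 0, 1], [-1], 4): A returns False, B returns False
import Mathlib
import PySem

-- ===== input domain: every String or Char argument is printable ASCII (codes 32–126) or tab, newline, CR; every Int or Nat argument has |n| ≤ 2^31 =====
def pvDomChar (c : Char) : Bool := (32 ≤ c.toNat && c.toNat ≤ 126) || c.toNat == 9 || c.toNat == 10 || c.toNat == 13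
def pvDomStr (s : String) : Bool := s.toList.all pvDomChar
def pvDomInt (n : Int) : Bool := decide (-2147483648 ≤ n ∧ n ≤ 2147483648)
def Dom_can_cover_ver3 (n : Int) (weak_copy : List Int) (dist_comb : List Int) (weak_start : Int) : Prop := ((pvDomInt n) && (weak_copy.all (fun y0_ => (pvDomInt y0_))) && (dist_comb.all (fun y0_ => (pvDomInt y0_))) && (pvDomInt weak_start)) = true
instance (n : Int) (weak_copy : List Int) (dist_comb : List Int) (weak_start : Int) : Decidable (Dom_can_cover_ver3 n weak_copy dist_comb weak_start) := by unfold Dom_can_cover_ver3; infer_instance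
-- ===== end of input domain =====

-- B replaces A's scan over weak-point indices by a friend-outer loop with a two-pointer cursor (alternative decomposition, same cost).


-- ===== PORT A =====
-- A's for-loop over range(weak_start, weak_start+weak_len) with state (dist_idx, prev_cover).
def aLoop (wc dc : List Int) : List Int → Int → Int → Bool
  | [], _, _ => true
  | j :: rest, dist_idx, prev_cover =>
    if PySem.List.pyGetD wc j 0 > prev_cover then
      if dist_idx = (dc.length : Int) - 1 then false
      else aLoop wc dc rest (dist_idx + 1)
             (PySem.List.pyGetD wc j 0 + PySem.List.pyGetD dc (dist_idx + 1) 0)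
    else aLoop wc dc rest dist_idx prev_cover

def can_cover_ver3 (n : Int) (weak_copy : List Int) (dist_comb : List Int) (weak_start : Int) : Bool :=
  let weak_len := PySem.Int.floordiv (weak_copy.length : Int) 2
  let prev_cover := PySem.List.pyGetD weak_copy weak_start 0 + PySem.List.pyGetD dist_comb 0 0
  aLoop weak_copy dist_comb (PySem.List.pyRange weak_start (weak_start + weak_len) 1) 0 prev_cover

-- ===== PORT B =====
-- B's inner while: advance the cursor while it is before `e` and the weak point is covered.
def bAdv (wc : List Int) (e cover cursor : Int) : Int :=
  if h : cursor < e ∧ PySem.List.pyGetD wc cursor 0 ≤ cover then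
    bAdv wc e cover (cursor + 1)
  else cursor
termination_by (e - cursor).toNat
decreasing_by omega

-- B's for-loop over the remaining friends dist_comb[1:].
def bLoop (wc : List Int) (e : Int) : List Int → Int → Int → Bool
  | [], cursor, cover => decide (bAdv wc e cover cursor ≥ e)
  | d :: rest, cursor, cover =>
    let cursor' := bAdv wc e cover cursor
    if cursor' ≥ e then true
    else bLoop wc e rest (cursor' + 1) (PySem.List.pyGetD wc cursor' 0 + d)

def can_cover_ver3_alt (n : Int) (weak_copy : List Int) (dist_comb : List Int) (weak_start : Int) : Bool :=
  let e := weak_start + PySem.Int.floordiv (weak_copy.length : Int) 2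
  let cover := PySem.List.pyGetD weak_copy weak_start 0 + PySem.List.pyGetD dist_comb 0 0
  bLoop weak_copy e (dist_comb.drop 1) weak_start cover

-- ===== PRECONDITION & SPEC =====
-- Pre_ excludes empty dist_comb and weak-point indices that fall out of range, where Python A
-- in general raises IndexError (on a few such inputs A still returns False early when the
-- friends run out before the bad index; B returns the same False there, see the cite).
def Pre_can_cover_ver3 (n : Int) (weak_copy : List Int) (dist_comb : List Int) (weak_start : Int) : Prop :=
  dist_comb ≠ [] ∧ -(weak_copy.length : Int) ≤ weak_start ∧ weak_start < (weak_copy.length : Int) ∧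
    weak_start + PySem.Int.floordiv (weak_copy.length : Int) 2 ≤ (weak_copy.length : Int)

instance (n : Int) (weak_copy : List Int) (dist_comb : List Int) (weak_start : Int) : Decidable (Pre_can_cover_ver3 n weak_copy dist_comb weak_start) := by unfold Pre_can_cover_ver3; infer_instance

def pvWitness_can_cover_ver3 : Int × List Int × List Int × Int := (0, [0, 10], [10], 0)

def Spec_can_cover_ver3 (n : Int) (weak_copy : List Int) (dist_comb : List Int) (weak_start : Int) (out : Bool) : Prop := out = can_cover_ver3_alt n weak_copy dist_comb weak_start
instance (n : Int) (weak_copy : List Int) (dist_comb : List Int) (weak_start : Int) (out : Bool) : Decidable (Spec_can_cover_ver3 n weak_copy dist_comb weak_start out) := by unfold Spec_can_cover_ver3; infer_instance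

-- ===== CLAIM (what is proved, stated in full; the proofs are below) =====
def Claim_equal_can_cover_ver3 : Prop := ∀ (n : Int) (weak_copy : List Int) (dist_comb : List Int) (weak_start : Int), Dom_can_cover_ver3 n weak_copy dist_comb weak_start → Pre_can_cover_ver3 n weak_copy dist_comb weak_start → Spec_can_cover_ver3 n weak_copy dist_comb weak_start (can_cover_ver3 n weak_copy dist_comb weak_start)

-- ===== LEMMAS AND PROOFS =====

lemma bAdv_stop (wc : List Int) (e cover cursor : Int)
    (h : ¬ (cursor < e ∧ PySem.List.pyGetD wc cursor 0 ≤ cover)) :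
    bAdv wc e cover cursor = cursor := by
  rw [bAdv]; simp [h]

lemma bAdv_step (wc : List Int) (e cover cursor : Int)
    (h1 : cursor < e) (h2 : PySem.List.pyGetD wc cursor 0 ≤ cover) :
    bAdv wc e cover cursor = bAdv wc e cover (cursor + 1) := by
  rw [bAdv]; simp [h1, h2]

-- If the cursor's weak point is covered, B's friend loop behaves the same from cursor+1.
lemma bLoop_step (wc : List Int) (e : Int) (ds : List Int) (cursor cover : Int)
    (h1 : cursor < e) (h2 : PySem.List.pyGetD wc cursor 0 ≤ cover) :
    bLoop wc e ds cursor cover = bLoop wc e ds (cursor + 1) cover := by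
  cases ds with
  | nil => simp [bLoop, bAdv_step wc e cover cursor h1 h2]
  | cons d rest => simp [bLoop, bAdv_step wc e cover cursor h1 h2]

-- Core equivalence: A's scan from index i with dist_idx k equals B's friend loop over
-- dist_comb[k+1:] with the cursor at i and the same current cover.
lemma loop_eq (wc dc : List Int) (e : Int) (i c k : Int)
    (hk : 0 ≤ k) (hklt : k < (dc.length : Int)) :
    aLoop wc dc (PySem.List.pyRange i e 1) k c = bLoop wc e (dc.drop (k + 1).toNat) i c := by
  by_cases hie : i < e
  · rw [PySem.List.pyRange_one_cons hie]
    by_cases hcov : PySem.List.pyGetD wc i 0 > c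
    · rw [aLoop]
      simp only [hcov, if_true]
      by_cases hlast : k = (dc.length : Int) - 1
      · have hdrop : dc.drop (k + 1).toNat = [] := by
          apply List.drop_eq_nil_of_le; omega
        rw [hdrop, if_pos hlast]
        simp only [bLoop]
        rw [bAdv_stop wc e c i (by omega)]
        simp; omega
      · rw [if_neg hlast]
        have hlen : (k + 1).toNat < dc.length := by omega
        have hdrop : dc.drop (k + 1).toNat = dc[(k + 1).toNat] :: dc.drop ((k + 1).toNat + 1) :=
          List.drop_eq_getElem_cons hlen
        have hget : PySem.List.pyGetD dc (k + 1) 0 = dc[(k + 1).toNat] :=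
          PySem.List.pyGetD_eq_getElem dc 0 (by omega) (by omega)
        rw [hdrop]
        simp only [bLoop]
        rw [bAdv_stop wc e c i (by omega)]
        rw [if_neg (by omega)]
        have h2 : ((k + 1) + 1).toNat = (k + 1).toNat + 1 := by omega
        have := loop_eq wc dc e (i + 1) (PySem.List.pyGetD wc i 0 + PySem.List.pyGetD dc (k + 1) 0) (k + 1) (by omega) (by omega)
        rw [h2] at this
        rw [← hget]
        exact this
    · rw [aLoop]
      simp only [hcov, if_false]
      rw [bLoop_step wc e _ i c hie (by omega)]
      exact loop_eq wc dc e (i + 1) c k hk hklt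
  · rw [PySem.List.pyRange_one_eq_nil (by omega)]
    cases hds : dc.drop (k + 1).toNat with
    | nil =>
      simp [aLoop, bLoop, bAdv_stop wc e c i (by omega)]
      omega
    | cons d rest =>
      simp only [aLoop, bLoop]
      rw [bAdv_stop wc e c i (by omega)]
      rw [if_pos (by omega)]
termination_by (e - i).toNat
decreasing_by all_goals omega

-- ===== VERDICT (by name: the statement is the Claim_ definition above) =====
theorem can_cover_ver3_spec : Claim_equal_can_cover_ver3 := by
  intro n wc dc ws _ hpre
  obtain ⟨hdc, _, _, _⟩ := hpre
  unfold Spec_can_cover_ver3 can_cover_ver3 can_cover_ver3_alt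
  have hlen : 0 < (dc.length : Int) := by
    have : dc.length ≠ 0 := fun h => hdc (List.eq_nil_of_length_eq_zero h)
    omega
  have := loop_eq wc dc (ws + PySem.Int.floordiv (wc.length : Int) 2) ws
    (PySem.List.pyGetD wc ws 0 + PySem.List.pyGetD dc 0 0) 0 le_rfl hlen
  simpa using this
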